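-- pv_equiv track=rewrite | github.com/avatarDD/zapret-gui | core/hosts_manager.py | _find_gui_block
-- ===== SOURCE A (Python) =====
-- MARKER_BEGIN = "# === ZAPRET-GUI BEGIN ==="
--
-- MARKER_END = "# === ZAPRET-GUI END ==="
--
-- def _find_gui_block(text):
--     """
--     Найти позиции GUI-блока в тексте.
--     Возвращает (begin_idx, end_idx) — индексы строк-маркеров,
--     или (None, None) если маркеров нет.
--     """
--     lines = text.splitlines()
--     begin_idx = None
--     end_idx = None
--
--     for i, line in enumerate(lines):
--         stripped = line.strip()
--         if stripped == MARKER_BEGIN: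
--             begin_idx = i
--         elif stripped == MARKER_END:
--             end_idx = i
--             break
--
--     return begin_idx, end_idx
-- ===== SOURCE B (Python) =====
-- MARKER_BEGIN = "# === ZAPRET-GUI BEGIN ==="
--
-- MARKER_END = "# === ZAPRET-GUI END ==="
--
-- def _find_gui_block(text):
--     # Strip all lines once; locate the first END marker, then search backwards
--     # for the last BEGIN marker strictly before it (whole list if no END).
--     stripped = [line.strip() for line in text.splitlines()]
--     try:
--         end_idx = stripped.index(MARKER_END)
--     except ValueError:
--         end_idx = None
--     prefix = stripped if end_idx is None else stripped[:end_idx]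
--     begin_idx = None
--     for j in range(len(prefix) - 1, -1, -1):
--         if prefix[j] == MARKER_BEGIN:
--             begin_idx = j
--             break
--     return begin_idx, end_idx
-- ===== Notes on version B (the rewrite author's own statement) =====
-- stated objective: alternative
-- what changed: A's single forward loop with a mutable begin_idx and a break is replaced by a locate-then-search decomposition: strip all lines once, find the first END marker by list.index, then scan backwards through the prefix before it for the last BEGIN marker.
import Mathlib
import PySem

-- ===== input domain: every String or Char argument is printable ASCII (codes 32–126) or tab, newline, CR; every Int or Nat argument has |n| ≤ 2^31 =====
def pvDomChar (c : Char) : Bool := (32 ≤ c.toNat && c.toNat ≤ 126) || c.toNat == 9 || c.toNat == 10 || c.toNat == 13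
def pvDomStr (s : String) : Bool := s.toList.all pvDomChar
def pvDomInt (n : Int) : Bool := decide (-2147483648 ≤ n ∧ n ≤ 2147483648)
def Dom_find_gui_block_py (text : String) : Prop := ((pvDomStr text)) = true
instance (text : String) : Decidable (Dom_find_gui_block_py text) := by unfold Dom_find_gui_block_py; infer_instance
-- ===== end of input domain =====

-- B replaces A's single forward loop-with-break by a different decomposition:
-- strip all lines once, locate the first END marker with an index search, then
-- scan BACKWARDS through the prefix before it for the last BEGIN marker (objective: alternative).

def pvMarkerBegin : String := "# === ZAPRET-GUI BEGIN ==="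
def pvMarkerEnd : String := "# === ZAPRET-GUI END ==="

-- ===== PORT A =====
-- A's for-loop over enumerate(lines) with mutable begin_idx and a break at the first END marker.
def pvLoopA : List String → Int → Option Int → Option Int × Option Int
  | [], _, b => (b, none)
  | line :: rest, i, b =>
    let stripped := PySem.Str.strip line
    if stripped = pvMarkerBegin then pvLoopA rest (i + 1) (some i)
    else if stripped = pvMarkerEnd then (b, some i)
    else pvLoopA rest (i + 1) b

def find_gui_block_py (text : String) : Option Int × Option Int :=
  pvLoopA (PySem.Str.splitlines text) 0 none

-- ===== PORT B =====
-- B's backward for-loop 'for j in range(len(prefix)-1, -1, -1): …break', as a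
-- recursion over the reversed prefix carrying the Python index j.
def pvRevFind : List String → Int → Option Int
  | [], _ => none
  | s :: rest, j => if s = pvMarkerBegin then some j else pvRevFind rest (j - 1)

def find_gui_block_py_alt (text : String) : Option Int × Option Int :=
  let stripped := (PySem.Str.splitlines text).map PySem.Str.strip
  let end_idx : Option Nat := PySem.List.index? stripped pvMarkerEnd
  let pre : List String := match end_idx with
    | none => stripped
    | some k => stripped.take k
  let begin_idx := pvRevFind pre.reverse ((pre.length : Int) - 1)
  (begin_idx, end_idx.map (fun k => (k : Int)))

-- ===== PRECONDITION & SPEC =====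
def Spec_find_gui_block_py (text : String) (out : Option Int × Option Int) : Prop := out = find_gui_block_py_alt text
instance (text : String) (out : Option Int × Option Int) : Decidable (Spec_find_gui_block_py text out) := by unfold Spec_find_gui_block_py; infer_instance

-- ===== CLAIM (what is proved, stated in full; the proofs are below) =====
def Claim_equal_find_gui_block_py : Prop := ∀ (text : String), Dom_find_gui_block_py text → Spec_find_gui_block_py text (find_gui_block_py text)

-- ===== LEMMAS AND PROOFS =====

-- B's core, generalized over the start index i and the begin-accumulator fallback b.
def pvBCore (ls : List String) (i : Int) (b : Option Int) : Option Int × Option Int :=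
  let e : Option Nat := PySem.List.index? ls pvMarkerEnd
  let pre : List String := match e with
    | none => ls
    | some k => ls.take k
  let r := pvRevFind pre.reverse ((pre.length : Int) - 1)
  ((match r with | some j => some (i + j) | none => b), e.map (fun k => i + (k : Int)))

theorem pvRevFind_shift (l : List String) (j : Int) :
    pvRevFind l (j + 1) = (pvRevFind l j).map (· + 1) := by
  induction l generalizing j with
  | nil => simp [pvRevFind]
  | cons s rest ih =>
    simp only [pvRevFind]
    split_ifs with h
    · simp
    · have := ih (j - 1)
      simpa [show j + 1 - 1 = (j - 1) + 1 by ring] using this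

theorem pvRevFind_append_single (l : List String) (s : String) (j : Int) :
    pvRevFind (l ++ [s]) j =
      match pvRevFind l j with
      | some v => some v
      | none => if s = pvMarkerBegin then some (j - l.length) else none := by
  induction l generalizing j with
  | nil => simp [pvRevFind]
  | cons x rest ih =>
    simp only [List.cons_append, pvRevFind]
    by_cases h : x = pvMarkerBegin
    · simp [h]
    · simp only [if_neg h]
      rw [ih (j - 1)]
      cases pvRevFind rest (j - 1) with
      | some v => rfl
      | none =>
        simp only [List.length_cons]
        split_ifs with hs
        · congr 1; push_cast; ring
        · rfl

-- the last-BEGIN search over the prefix, with the head element peeled off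
theorem pvRevFind_peel (s : String) (ls : List String) :
    pvRevFind (s :: ls).reverse (((s :: ls).length : Int) - 1) =
      match pvRevFind ls.reverse ((ls.length : Int) - 1) with
      | some v => some (v + 1)
      | none => if s = pvMarkerBegin then some 0 else none := by
  have h1 : (s :: ls).reverse = ls.reverse ++ [s] := by simp
  have h2 : (((s :: ls).length : Int) - 1) = ((ls.length : Int) - 1) + 1 := by
    push_cast [List.length_cons]; ring
  rw [h1, h2, pvRevFind_shift, pvRevFind_append_single]
  cases pvRevFind ls.reverse ((ls.length : Int) - 1) with
  | some v => simp
  | none => split_ifs <;> simp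

theorem pvBCore_cons_end (ls : List String) (i : Int) (b : Option Int) :
    pvBCore (pvMarkerEnd :: ls) i b = (b, some i) := by
  simp only [pvBCore]
  rw [PySem.List.index?_cons_self]
  simp [pvRevFind]

theorem pvBCore_cons (s : String) (ls : List String) (i : Int) (b : Option Int)
    (hNE : s ≠ pvMarkerEnd) :
    pvBCore (s :: ls) i b
      = pvBCore ls (i + 1) (if s = pvMarkerBegin then some i else b) := by
  simp only [pvBCore]
  rw [PySem.List.index?_cons_of_ne _ hNE]
  cases hE : PySem.List.index? ls pvMarkerEnd with
  | none =>
    simp only [Option.map_none]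
    rw [pvRevFind_peel]
    cases pvRevFind ls.reverse ((ls.length : Int) - 1) with
    | some v =>
      simp only [Prod.mk.injEq]
      refine ⟨by congr 1; ring, by simp⟩
    | none =>
      simp only [Prod.mk.injEq]
      refine ⟨?_, by simp⟩
      split_ifs with hs
      · simp
      · rfl
  | some k =>
    obtain ⟨hk, -, -⟩ := PySem.List.getElem_of_index?_eq_some hE
    have htake : (s :: ls).take (k + 1) = s :: ls.take k := by simp
    simp only [Option.map_some, htake]
    rw [pvRevFind_peel]
    have hlen : (ls.take k).length = k := by
      simp [Nat.min_eq_left (Nat.le_of_lt hk)]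
    rw [hlen]
    cases pvRevFind (ls.take k).reverse ((k : Int) - 1) with
    | some v =>
      simp only [Prod.mk.injEq]
      refine ⟨by congr 1; ring, by simp; ring⟩
    | none =>
      simp only [Prod.mk.injEq]
      refine ⟨?_, by simp; ring⟩
      split_ifs with hs
      · simp
      · rfl

theorem pvMain (lines : List String) (i : Int) (b : Option Int) :
    pvLoopA lines i b = pvBCore (lines.map PySem.Str.strip) i b := by
  induction lines generalizing i b with
  | nil => simp [pvLoopA, pvBCore, PySem.List.index?, pvRevFind]
  | cons line rest ih =>
    simp only [List.map_cons, pvLoopA]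
    by_cases hB : PySem.Str.strip line = pvMarkerBegin
    · have hNE : PySem.Str.strip line ≠ pvMarkerEnd := by rw [hB]; decide
      rw [if_pos hB, ih, pvBCore_cons _ _ _ _ hNE, if_pos hB]
    · by_cases hE : PySem.Str.strip line = pvMarkerEnd
      · rw [if_neg hB, if_pos hE, hE, pvBCore_cons_end]
      · rw [if_neg hB, if_neg hE, ih, pvBCore_cons _ _ _ _ hE, if_neg hB]

theorem pvAlt_eq_core (text : String) :
    find_gui_block_py_alt text
      = pvBCore ((PySem.Str.splitlines text).map PySem.Str.strip) 0 none := by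
  simp only [find_gui_block_py_alt, pvBCore]
  cases hE : PySem.List.index? ((PySem.Str.splitlines text).map PySem.Str.strip) pvMarkerEnd with
  | none =>
    simp only
    cases pvRevFind (((PySem.Str.splitlines text).map PySem.Str.strip)).reverse
        ((((PySem.Str.splitlines text).map PySem.Str.strip).length : Int) - 1) <;> simp
  | some k =>
    simp only
    cases pvRevFind ((((PySem.Str.splitlines text).map PySem.Str.strip)).take k).reverse
        (((((PySem.Str.splitlines text).map PySem.Str.strip).take k).length : Int) - 1) <;> simp

-- ===== VERDICT (by name: the statement is the Claim_ definition above) =====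
theorem find_gui_block_py_spec : Claim_equal_find_gui_block_py := by
  intro text _
  show find_gui_block_py text = find_gui_block_py_alt text
  rw [find_gui_block_py, pvMain, pvAlt_eq_core]
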